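-- pv_equiv track=rewrite | github.com/takapdayon/atcoder | abc/AtCoderBeginnerContest123/B.py | five_dishes
-- ===== SOURCE A (Python) =====
-- def five_dishes(li):
--
--     ans = 0
--     count = 10
--     for i in li:
--         ans += -(-i//10)*10
--         if i%10 != 0:
--             count = min(count, i%10)
--     return ans-(10-count) if count != 10 else ans
-- ===== SOURCE B (Python) =====
-- def five_dishes(li):
--     # Bucket counting: histogram of remainders mod 10 replaces A's running-min tracking.
--     freq = [0] * 10
--     total = 0
--     for x in li:
--         total += x
--         freq[x % 10] += 1
--     ans = total + sum(freq[r] * (10 - r) for r in range(1, 10))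
--     for r in range(1, 10):
--         if freq[r]:
--             return ans - (10 - r)
--     return ans
-- ===== Notes on version B (the rewrite author's own statement) =====
-- stated objective: alternative
-- what changed: B builds a remainder-mod-10 histogram (bucket counts) in one pass, computes the rounded total from the bucket counts, and finds the smallest nonzero remainder by scanning the 10 fixed buckets with early return, instead of A's per-element ceiling division with an in-loop running minimum and sentinel 10.
import Mathlib
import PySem

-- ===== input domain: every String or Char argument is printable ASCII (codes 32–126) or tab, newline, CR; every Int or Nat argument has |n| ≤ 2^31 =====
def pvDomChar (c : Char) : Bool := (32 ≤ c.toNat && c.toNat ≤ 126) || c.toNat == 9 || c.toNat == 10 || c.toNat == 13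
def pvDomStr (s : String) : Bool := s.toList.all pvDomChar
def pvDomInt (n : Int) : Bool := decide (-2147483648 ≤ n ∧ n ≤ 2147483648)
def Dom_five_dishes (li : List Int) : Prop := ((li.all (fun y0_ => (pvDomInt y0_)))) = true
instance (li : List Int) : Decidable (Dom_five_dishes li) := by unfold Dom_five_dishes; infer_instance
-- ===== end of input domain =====

-- B builds a remainder-mod-10 histogram in one pass and scans the 10 fixed buckets
-- for the smallest nonzero remainder, instead of A's in-loop running minimum; objective: alternative.
-- ===== PORT A =====
def five_dishes (li : List Int) : Int :=
  let s := li.foldl (fun (st : Int × Int) i =>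
    (st.1 + -(PySem.Int.floordiv (-i) 10) * 10,
     if PySem.Int.mod i 10 ≠ 0 then min st.2 (PySem.Int.mod i 10) else st.2)) (0, 10)
  if s.2 ≠ 10 then s.1 - (10 - s.2) else s.1

-- ===== PORT B =====
-- the early-return scan 'for r in range(1,10): if freq[r]: return ans-(10-r)'
def pvScan (freq : List Int) (ans : Int) : List Int → Int
  | [] => ans
  | r :: rest => if freq.getD r.toNat 0 ≠ 0 then ans - (10 - r) else pvScan freq ans rest

def five_dishes_alt (li : List Int) : Int :=
  let st := li.foldl (fun (st : Int × List Int) x =>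
      (st.1 + x,
       st.2.set (PySem.Int.mod x 10).toNat (st.2.getD (PySem.Int.mod x 10).toNat 0 + 1)))
    (0, List.replicate 10 0)
  let ans := st.1 + ((PySem.List.pyRange 1 10 1).map (fun r => st.2.getD r.toNat 0 * (10 - r))).sum
  pvScan st.2 ans (PySem.List.pyRange 1 10 1)

-- ===== PRECONDITION & SPEC =====
def Spec_five_dishes (li : List Int) (out : Int) : Prop := out = five_dishes_alt li
instance (li : List Int) (out : Int) : Decidable (Spec_five_dishes li out) := by unfold Spec_five_dishes; infer_instance

-- ===== CLAIM (what is proved, stated in full; the proofs are below) =====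
def Claim_equal_five_dishes : Prop := ∀ (li : List Int), Dom_five_dishes li → Spec_five_dishes li (five_dishes li)

-- ===== LEMMAS AND PROOFS =====

-- count of elements of li with remainder r mod 10
def pvCnt (r : Int) (li : List Int) : Int := (li.countP (fun x => PySem.Int.mod x 10 == r) : Int)

-- A's running minimum (second fold component)
def pvMin (li : List Int) : Int :=
  li.foldl (fun c x => if PySem.Int.mod x 10 ≠ 0 then min c (PySem.Int.mod x 10) else c) 10

lemma pvMod_bounds (x : Int) : 0 ≤ PySem.Int.mod x 10 ∧ PySem.Int.mod x 10 < 10 := by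
  rw [PySem.Int.mod_eq_emod_of_pos (by norm_num)]
  omega

lemma pvCeil (x : Int) : -(PySem.Int.floordiv (-x) 10) * 10
    = x + (if PySem.Int.mod x 10 = 0 then 0 else 10 - PySem.Int.mod x 10) := by
  rw [PySem.Int.mod_eq_emod_of_pos (by norm_num),
      PySem.Int.floordiv_eq_ediv_of_pos (by norm_num)]
  omega

lemma pvCnt_cons (r x : Int) (t : List Int) :
    pvCnt r (x :: t) = pvCnt r t + (if PySem.Int.mod x 10 = r then 1 else 0) := by
  simp only [pvCnt, List.countP_cons]
  by_cases h : PySem.Int.mod x 10 = r <;> simp [h]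

lemma pvCnt_zero_iff (r : Int) (li : List Int) :
    pvCnt r li = 0 ↔ ∀ x ∈ li, PySem.Int.mod x 10 ≠ r := by
  simp only [pvCnt]
  rw [Int.natCast_eq_zero, List.countP_eq_zero]
  simp


def pvPads (li : List Int) : Int :=
  (li.map (fun x => if PySem.Int.mod x 10 = 0 then 0 else 10 - PySem.Int.mod x 10)).sum

-- A's fold splits into sum+pads and the running minimum
lemma A_fold : ∀ (li : List Int) (a c : Int),
    li.foldl (fun (st : Int × Int) i =>
      (st.1 + -(PySem.Int.floordiv (-i) 10) * 10,
       if PySem.Int.mod i 10 ≠ 0 then min st.2 (PySem.Int.mod i 10) else st.2)) (a, c)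
    = (a + li.sum + pvPads li,
       li.foldl (fun c x => if PySem.Int.mod x 10 ≠ 0 then min c (PySem.Int.mod x 10) else c) c) := by
  intro li
  induction li with
  | nil => intro a c; simp [pvPads]
  | cons x t ih =>
    intro a c
    simp only [List.foldl_cons, ih, pvPads, List.map_cons, List.sum_cons, List.sum_cons, Prod.mk.injEq]
    refine ⟨?_, trivial⟩
    have := pvCeil x
    by_cases h : PySem.Int.mod x 10 = 0 <;> simp [h] at this ⊢ <;> omega

lemma pvMin_init_le : ∀ (li : List Int) (c : Int),
    li.foldl (fun c x => if PySem.Int.mod x 10 ≠ 0 then min c (PySem.Int.mod x 10) else c) c ≤ c := by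
  intro li
  induction li with
  | nil => intro c; simp
  | cons y t ih =>
    intro c
    simp only [List.foldl_cons]
    by_cases h : PySem.Int.mod y 10 ≠ 0
    · rw [if_pos h]
      have := ih (min c (PySem.Int.mod y 10))
      omega
    · rw [if_neg h]; exact ih c

lemma pvMin_le : ∀ (li : List Int) (c x : Int), x ∈ li → PySem.Int.mod x 10 ≠ 0 →
    li.foldl (fun c x => if PySem.Int.mod x 10 ≠ 0 then min c (PySem.Int.mod x 10) else c) c
      ≤ PySem.Int.mod x 10 := by
  intro li
  induction li with
  | nil => intro c x hx; simp at hx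
  | cons y t ih =>
    intro c x hx hmod
    simp only [List.foldl_cons]
    rcases List.mem_cons.mp hx with h | h
    · subst h
      rw [if_pos hmod]
      have := pvMin_init_le t (min c (PySem.Int.mod x 10))
      omega
    · by_cases hy : PySem.Int.mod y 10 ≠ 0
      · rw [if_pos hy]; exact ih _ x h hmod
      · rw [if_neg hy]; exact ih c x h hmod

lemma pvMin_mem : ∀ (li : List Int) (c : Int),
    (li.foldl (fun c x => if PySem.Int.mod x 10 ≠ 0 then min c (PySem.Int.mod x 10) else c) c = c)
    ∨ ∃ x ∈ li, PySem.Int.mod x 10 ≠ 0 ∧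
        PySem.Int.mod x 10 =
          li.foldl (fun c x => if PySem.Int.mod x 10 ≠ 0 then min c (PySem.Int.mod x 10) else c) c := by
  intro li
  induction li with
  | nil => intro c; left; simp
  | cons y t ih =>
    intro c
    simp only [List.foldl_cons]
    by_cases hy : PySem.Int.mod y 10 ≠ 0
    · rw [if_pos hy]
      rcases ih (min c (PySem.Int.mod y 10)) with h | ⟨x, hx, h1, h2⟩
      · by_cases hle : PySem.Int.mod y 10 ≤ c
        · right
          exact ⟨y, List.mem_cons_self, hy, by rw [h]; omega⟩
        · left; rw [h]; omega
      · right; exact ⟨x, List.mem_cons_of_mem _ hx, h1, h2⟩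
    · rw [if_neg hy]
      rcases ih c with h | ⟨x, hx, h1, h2⟩
      · left; exact h
      · right; exact ⟨x, List.mem_cons_of_mem _ hx, h1, h2⟩

lemma pvMin_pos : ∀ (li : List Int) (c : Int), 1 ≤ c →
    1 ≤ li.foldl (fun c x => if PySem.Int.mod x 10 ≠ 0 then min c (PySem.Int.mod x 10) else c) c := by
  intro li
  induction li with
  | nil => intro c hc; simpa using hc
  | cons y t ih =>
    intro c hc
    simp only [List.foldl_cons]
    by_cases hy : PySem.Int.mod y 10 ≠ 0
    · have hb := pvMod_bounds y
      rw [if_pos hy]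
      exact ih _ (by omega)
    · rw [if_neg hy]; exact ih c hc

-- getD through a set at an in-range index
lemma pv_getD_set (fr : List Int) (n r : Nat) (v : Int) (hn : n < fr.length) :
    (fr.set n v).getD r 0 = if n = r then v else fr.getD r 0 := by
  rw [List.getD_eq_getElem?_getD, List.getD_eq_getElem?_getD, List.getElem?_set]
  by_cases h : n = r
  · subst h; rw [if_pos rfl, if_pos rfl, if_pos hn]; rfl
  · rw [if_neg h, if_neg h]

-- B's fold: running total and the histogram entries
lemma B_fold : ∀ (li : List Int) (t : Int) (fr : List Int), fr.length = 10 →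
    (li.foldl (fun (st : Int × List Int) x =>
        (st.1 + x,
         st.2.set (PySem.Int.mod x 10).toNat (st.2.getD (PySem.Int.mod x 10).toNat 0 + 1)))
      (t, fr)).1 = t + li.sum
    ∧ (li.foldl (fun (st : Int × List Int) x =>
        (st.1 + x,
         st.2.set (PySem.Int.mod x 10).toNat (st.2.getD (PySem.Int.mod x 10).toNat 0 + 1)))
      (t, fr)).2.length = 10
    ∧ ∀ r : Nat, r < 10 →
        ((li.foldl (fun (st : Int × List Int) x =>
          (st.1 + x,
           st.2.set (PySem.Int.mod x 10).toNat (st.2.getD (PySem.Int.mod x 10).toNat 0 + 1)))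
        (t, fr)).2.getD r 0) = fr.getD r 0 + pvCnt (r : Int) li := by
  intro li
  induction li with
  | nil => intro t fr h; refine ⟨by simp, h, ?_⟩; intro r hr; simp [pvCnt]
  | cons x tail ih =>
    intro t fr hlen
    have hb := pvMod_bounds x
    set n := (PySem.Int.mod x 10).toNat with hn
    have hncast : (n : Int) = PySem.Int.mod x 10 := Int.toNat_of_nonneg hb.1
    have hnlt : n < fr.length := by omega
    set fr' := fr.set n (fr.getD n 0 + 1) with hfr'
    have hlen' : fr'.length = 10 := by rw [hfr', List.length_set]; exact hlen
    obtain ⟨ih1, ih2, ih3⟩ := ih (t + x) fr' hlen'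
    refine ⟨?_, ?_, ?_⟩
    · simp only [List.foldl_cons]
      rw [ih1]
      simp only [List.sum_cons]
      ring
    · simp only [List.foldl_cons]
      exact ih2
    · intro r hr
      simp only [List.foldl_cons]
      rw [ih3 r hr, hfr', pv_getD_set fr n r _ hnlt, pvCnt_cons]
      by_cases h : n = r
      · subst h
        rw [if_pos rfl, if_pos hncast.symm]
        ring
      · rw [if_neg h, if_neg (by omega)]
        ring

lemma sum_cnt_pads : ∀ (li : List Int),
    (([1,2,3,4,5,6,7,8,9] : List Int).map (fun r => pvCnt r li * (10 - r))).sum = pvPads li := by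
  intro li
  induction li with
  | nil => simp [pvCnt, pvPads]
  | cons x t ih =>
    have hb := pvMod_bounds x
    simp only [List.map_cons, List.sum_cons, List.map_nil, List.sum_nil, pvCnt_cons,
      pvPads, List.map_cons, List.sum_cons] at ih ⊢
    omega

-- evaluation of the 9-bucket early-return scan, given where the first nonzero bucket is
lemma scan_eval (li : List Int) (ans m : Int) (h1 : 1 ≤ m) (h10 : m ≤ 10)
    (hbelow : ∀ k : Int, 1 ≤ k → k < m → pvCnt k li = 0)
    (hat : m ≤ 9 → pvCnt m li ≠ 0) :
    (if pvCnt 1 li ≠ 0 then ans - (10 - 1) else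
     if pvCnt 2 li ≠ 0 then ans - (10 - 2) else
     if pvCnt 3 li ≠ 0 then ans - (10 - 3) else
     if pvCnt 4 li ≠ 0 then ans - (10 - 4) else
     if pvCnt 5 li ≠ 0 then ans - (10 - 5) else
     if pvCnt 6 li ≠ 0 then ans - (10 - 6) else
     if pvCnt 7 li ≠ 0 then ans - (10 - 7) else
     if pvCnt 8 li ≠ 0 then ans - (10 - 8) else
     if pvCnt 9 li ≠ 0 then ans - (10 - 9) else ans)
    = if m ≠ 10 then ans - (10 - m) else ans := by
  have hm : m = 1 ∨ m = 2 ∨ m = 3 ∨ m = 4 ∨ m = 5 ∨ m = 6 ∨ m = 7 ∨ m = 8 ∨ m = 9 ∨ m = 10 := by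
    omega
  rcases hm with rfl | rfl | rfl | rfl | rfl | rfl | rfl | rfl | rfl | rfl
  · have hk : pvCnt 1 li ≠ 0 := hat (by norm_num)
    rw [if_pos hk, if_pos (by norm_num)]
  · have h1 : pvCnt 1 li = 0 := hbelow 1 (by norm_num) (by norm_num)
    have hk : pvCnt 2 li ≠ 0 := hat (by norm_num)
    rw [if_neg (fun hc => hc h1)]
    rw [if_pos hk, if_pos (by norm_num)]
  · have h1 : pvCnt 1 li = 0 := hbelow 1 (by norm_num) (by norm_num)
    have h2 : pvCnt 2 li = 0 := hbelow 2 (by norm_num) (by norm_num)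
    have hk : pvCnt 3 li ≠ 0 := hat (by norm_num)
    rw [if_neg (fun hc => hc h1)]
    rw [if_neg (fun hc => hc h2)]
    rw [if_pos hk, if_pos (by norm_num)]
  · have h1 : pvCnt 1 li = 0 := hbelow 1 (by norm_num) (by norm_num)
    have h2 : pvCnt 2 li = 0 := hbelow 2 (by norm_num) (by norm_num)
    have h3 : pvCnt 3 li = 0 := hbelow 3 (by norm_num) (by norm_num)
    have hk : pvCnt 4 li ≠ 0 := hat (by norm_num)
    rw [if_neg (fun hc => hc h1)]
    rw [if_neg (fun hc => hc h2)]
    rw [if_neg (fun hc => hc h3)]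
    rw [if_pos hk, if_pos (by norm_num)]
  · have h1 : pvCnt 1 li = 0 := hbelow 1 (by norm_num) (by norm_num)
    have h2 : pvCnt 2 li = 0 := hbelow 2 (by norm_num) (by norm_num)
    have h3 : pvCnt 3 li = 0 := hbelow 3 (by norm_num) (by norm_num)
    have h4 : pvCnt 4 li = 0 := hbelow 4 (by norm_num) (by norm_num)
    have hk : pvCnt 5 li ≠ 0 := hat (by norm_num)
    rw [if_neg (fun hc => hc h1)]
    rw [if_neg (fun hc => hc h2)]
    rw [if_neg (fun hc => hc h3)]
    rw [if_neg (fun hc => hc h4)]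
    rw [if_pos hk, if_pos (by norm_num)]
  · have h1 : pvCnt 1 li = 0 := hbelow 1 (by norm_num) (by norm_num)
    have h2 : pvCnt 2 li = 0 := hbelow 2 (by norm_num) (by norm_num)
    have h3 : pvCnt 3 li = 0 := hbelow 3 (by norm_num) (by norm_num)
    have h4 : pvCnt 4 li = 0 := hbelow 4 (by norm_num) (by norm_num)
    have h5 : pvCnt 5 li = 0 := hbelow 5 (by norm_num) (by norm_num)
    have hk : pvCnt 6 li ≠ 0 := hat (by norm_num)
    rw [if_neg (fun hc => hc h1)]
    rw [if_neg (fun hc => hc h2)]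
    rw [if_neg (fun hc => hc h3)]
    rw [if_neg (fun hc => hc h4)]
    rw [if_neg (fun hc => hc h5)]
    rw [if_pos hk, if_pos (by norm_num)]
  · have h1 : pvCnt 1 li = 0 := hbelow 1 (by norm_num) (by norm_num)
    have h2 : pvCnt 2 li = 0 := hbelow 2 (by norm_num) (by norm_num)
    have h3 : pvCnt 3 li = 0 := hbelow 3 (by norm_num) (by norm_num)
    have h4 : pvCnt 4 li = 0 := hbelow 4 (by norm_num) (by norm_num)
    have h5 : pvCnt 5 li = 0 := hbelow 5 (by norm_num) (by norm_num)
    have h6 : pvCnt 6 li = 0 := hbelow 6 (by norm_num) (by norm_num)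
    have hk : pvCnt 7 li ≠ 0 := hat (by norm_num)
    rw [if_neg (fun hc => hc h1)]
    rw [if_neg (fun hc => hc h2)]
    rw [if_neg (fun hc => hc h3)]
    rw [if_neg (fun hc => hc h4)]
    rw [if_neg (fun hc => hc h5)]
    rw [if_neg (fun hc => hc h6)]
    rw [if_pos hk, if_pos (by norm_num)]
  · have h1 : pvCnt 1 li = 0 := hbelow 1 (by norm_num) (by norm_num)
    have h2 : pvCnt 2 li = 0 := hbelow 2 (by norm_num) (by norm_num)
    have h3 : pvCnt 3 li = 0 := hbelow 3 (by norm_num) (by norm_num)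
    have h4 : pvCnt 4 li = 0 := hbelow 4 (by norm_num) (by norm_num)
    have h5 : pvCnt 5 li = 0 := hbelow 5 (by norm_num) (by norm_num)
    have h6 : pvCnt 6 li = 0 := hbelow 6 (by norm_num) (by norm_num)
    have h7 : pvCnt 7 li = 0 := hbelow 7 (by norm_num) (by norm_num)
    have hk : pvCnt 8 li ≠ 0 := hat (by norm_num)
    rw [if_neg (fun hc => hc h1)]
    rw [if_neg (fun hc => hc h2)]
    rw [if_neg (fun hc => hc h3)]
    rw [if_neg (fun hc => hc h4)]
    rw [if_neg (fun hc => hc h5)]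
    rw [if_neg (fun hc => hc h6)]
    rw [if_neg (fun hc => hc h7)]
    rw [if_pos hk, if_pos (by norm_num)]
  · have h1 : pvCnt 1 li = 0 := hbelow 1 (by norm_num) (by norm_num)
    have h2 : pvCnt 2 li = 0 := hbelow 2 (by norm_num) (by norm_num)
    have h3 : pvCnt 3 li = 0 := hbelow 3 (by norm_num) (by norm_num)
    have h4 : pvCnt 4 li = 0 := hbelow 4 (by norm_num) (by norm_num)
    have h5 : pvCnt 5 li = 0 := hbelow 5 (by norm_num) (by norm_num)
    have h6 : pvCnt 6 li = 0 := hbelow 6 (by norm_num) (by norm_num)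
    have h7 : pvCnt 7 li = 0 := hbelow 7 (by norm_num) (by norm_num)
    have h8 : pvCnt 8 li = 0 := hbelow 8 (by norm_num) (by norm_num)
    have hk : pvCnt 9 li ≠ 0 := hat (by norm_num)
    rw [if_neg (fun hc => hc h1)]
    rw [if_neg (fun hc => hc h2)]
    rw [if_neg (fun hc => hc h3)]
    rw [if_neg (fun hc => hc h4)]
    rw [if_neg (fun hc => hc h5)]
    rw [if_neg (fun hc => hc h6)]
    rw [if_neg (fun hc => hc h7)]
    rw [if_neg (fun hc => hc h8)]
    rw [if_pos hk, if_pos (by norm_num)]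
  · have h1 : pvCnt 1 li = 0 := hbelow 1 (by norm_num) (by norm_num)
    have h2 : pvCnt 2 li = 0 := hbelow 2 (by norm_num) (by norm_num)
    have h3 : pvCnt 3 li = 0 := hbelow 3 (by norm_num) (by norm_num)
    have h4 : pvCnt 4 li = 0 := hbelow 4 (by norm_num) (by norm_num)
    have h5 : pvCnt 5 li = 0 := hbelow 5 (by norm_num) (by norm_num)
    have h6 : pvCnt 6 li = 0 := hbelow 6 (by norm_num) (by norm_num)
    have h7 : pvCnt 7 li = 0 := hbelow 7 (by norm_num) (by norm_num)
    have h8 : pvCnt 8 li = 0 := hbelow 8 (by norm_num) (by norm_num)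
    have h9 : pvCnt 9 li = 0 := hbelow 9 (by norm_num) (by norm_num)
    rw [if_neg (fun hc => hc h1)]
    rw [if_neg (fun hc => hc h2)]
    rw [if_neg (fun hc => hc h3)]
    rw [if_neg (fun hc => hc h4)]
    rw [if_neg (fun hc => hc h5)]
    rw [if_neg (fun hc => hc h6)]
    rw [if_neg (fun hc => hc h7)]
    rw [if_neg (fun hc => hc h8)]
    rw [if_neg (fun hc => hc h9)]
    rw [if_neg (by norm_num)]

-- ===== VERDICT (by name: the statement is the Claim_ definition above) =====
theorem five_dishes_spec : Claim_equal_five_dishes := by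
  intro li _
  unfold Spec_five_dishes
  simp only [five_dishes, five_dishes_alt]
  rw [A_fold]
  obtain ⟨h1, h2, h3⟩ := B_fold li 0 (List.replicate 10 0) (by simp)
  have hrange : PySem.List.pyRange 1 10 1 = [1,2,3,4,5,6,7,8,9] := by decide
  have e1 : (li.foldl (fun (st : Int × List Int) x =>
      (st.1 + x, st.2.set (PySem.Int.mod x 10).toNat (st.2.getD (PySem.Int.mod x 10).toNat 0 + 1)))
      (0, List.replicate 10 0)).2.getD (1:Int).toNat 0 = pvCnt 1 li := by
    have := h3 1 (by norm_num); simpa using this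
  have e2 : (li.foldl (fun (st : Int × List Int) x =>
      (st.1 + x, st.2.set (PySem.Int.mod x 10).toNat (st.2.getD (PySem.Int.mod x 10).toNat 0 + 1)))
      (0, List.replicate 10 0)).2.getD (2:Int).toNat 0 = pvCnt 2 li := by
    have := h3 2 (by norm_num); simpa using this
  have e3 : (li.foldl (fun (st : Int × List Int) x =>
      (st.1 + x, st.2.set (PySem.Int.mod x 10).toNat (st.2.getD (PySem.Int.mod x 10).toNat 0 + 1)))
      (0, List.replicate 10 0)).2.getD (3:Int).toNat 0 = pvCnt 3 li := by
    have := h3 3 (by norm_num); simpa using this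
  have e4 : (li.foldl (fun (st : Int × List Int) x =>
      (st.1 + x, st.2.set (PySem.Int.mod x 10).toNat (st.2.getD (PySem.Int.mod x 10).toNat 0 + 1)))
      (0, List.replicate 10 0)).2.getD (4:Int).toNat 0 = pvCnt 4 li := by
    have := h3 4 (by norm_num); simpa using this
  have e5 : (li.foldl (fun (st : Int × List Int) x =>
      (st.1 + x, st.2.set (PySem.Int.mod x 10).toNat (st.2.getD (PySem.Int.mod x 10).toNat 0 + 1)))
      (0, List.replicate 10 0)).2.getD (5:Int).toNat 0 = pvCnt 5 li := by
    have := h3 5 (by norm_num); simpa using this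
  have e6 : (li.foldl (fun (st : Int × List Int) x =>
      (st.1 + x, st.2.set (PySem.Int.mod x 10).toNat (st.2.getD (PySem.Int.mod x 10).toNat 0 + 1)))
      (0, List.replicate 10 0)).2.getD (6:Int).toNat 0 = pvCnt 6 li := by
    have := h3 6 (by norm_num); simpa using this
  have e7 : (li.foldl (fun (st : Int × List Int) x =>
      (st.1 + x, st.2.set (PySem.Int.mod x 10).toNat (st.2.getD (PySem.Int.mod x 10).toNat 0 + 1)))
      (0, List.replicate 10 0)).2.getD (7:Int).toNat 0 = pvCnt 7 li := by
    have := h3 7 (by norm_num); simpa using this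
  have e8 : (li.foldl (fun (st : Int × List Int) x =>
      (st.1 + x, st.2.set (PySem.Int.mod x 10).toNat (st.2.getD (PySem.Int.mod x 10).toNat 0 + 1)))
      (0, List.replicate 10 0)).2.getD (8:Int).toNat 0 = pvCnt 8 li := by
    have := h3 8 (by norm_num); simpa using this
  have e9 : (li.foldl (fun (st : Int × List Int) x =>
      (st.1 + x, st.2.set (PySem.Int.mod x 10).toNat (st.2.getD (PySem.Int.mod x 10).toNat 0 + 1)))
      (0, List.replicate 10 0)).2.getD (9:Int).toNat 0 = pvCnt 9 li := by
    have := h3 9 (by norm_num); simpa using this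
  have hMpos : (1:Int) ≤ li.foldl
      (fun c x => if PySem.Int.mod x 10 ≠ 0 then min c (PySem.Int.mod x 10) else c) 10 :=
    pvMin_pos li 10 (by norm_num)
  have hMle : li.foldl
      (fun c x => if PySem.Int.mod x 10 ≠ 0 then min c (PySem.Int.mod x 10) else c) 10 ≤ 10 :=
    pvMin_init_le li 10
  have hbelow : ∀ k : Int, 1 ≤ k →
      k < li.foldl (fun c x => if PySem.Int.mod x 10 ≠ 0 then min c (PySem.Int.mod x 10) else c) 10 →
      pvCnt k li = 0 := by
    intro k hk1 hkM
    rw [pvCnt_zero_iff]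
    intro x hx hmod
    have hne : PySem.Int.mod x 10 ≠ 0 := by rw [hmod]; omega
    have := pvMin_le li 10 x hx hne
    rw [hmod] at this
    omega
  have hat : li.foldl (fun c x => if PySem.Int.mod x 10 ≠ 0 then min c (PySem.Int.mod x 10) else c) 10 ≤ 9 →
      pvCnt (li.foldl (fun c x => if PySem.Int.mod x 10 ≠ 0 then min c (PySem.Int.mod x 10) else c) 10) li ≠ 0 := by
    intro hle
    rcases pvMin_mem li 10 with h | ⟨x, hx, hxne, hxeq⟩
    · omega
    · intro hzero
      exact ((pvCnt_zero_iff _ li).mp hzero) x hx hxeq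
  rw [hrange]
  simp only [pvScan, List.map_cons, List.map_nil, List.sum_cons, List.sum_nil]
  rw [e1, e2, e3, e4, e5, e6, e7, e8, e9, h1]
  have hsum := sum_cnt_pads li
  simp only [List.map_cons, List.map_nil, List.sum_cons, List.sum_nil] at hsum
  rw [scan_eval li _ _ hMpos hMle hbelow hat]
  split_ifs with h
  · rw [hsum]
  · rw [hsum]
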